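-- pv_equiv track=rewrite | github.com/baconomist/roobet-crash-bot-v2 | src/data_analysis/data_utils.py | get_streak_frequencies
-- ===== SOURCE A (Python) =====
-- def get_streak_frequencies(multiplier, values):
--     curr_streak_size = 0
--     streak_sizes = []
--     for i in range(len(values)):
--         if values[i] < multiplier:
--             curr_streak_size += 1
--         else:
--             streak_sizes.append(curr_streak_size)
--             curr_streak_size = 0
--
--     streak_frequencies = {}
--     for streak_size in streak_sizes:
--         if streak_size not in streak_frequencies.keys():
--             streak_frequencies[streak_size] = 0
--         streak_frequencies[streak_size] += 1
--
--     return streak_frequencies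
-- ===== SOURCE B (Python) =====
-- import collections
--
--
-- def get_streak_frequencies(multiplier, values):
--     # Separator positions: indices whose value ends a streak.
--     seps = [i for i, v in enumerate(values) if not (v < multiplier)]
--     streak_lengths = []
--     prev = -1
--     for p in seps:
--         streak_lengths.append(p - prev - 1)
--         prev = p
--     return dict(collections.Counter(streak_lengths))
-- ===== Notes on version B (the rewrite author's own statement) =====
-- stated objective: idiomatic
-- what changed: Streak lengths are reconstructed as gaps between separator indices collected via enumerate, and the hand-rolled membership-test counting dict is replaced by collections.Counter.
import Mathlib
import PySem

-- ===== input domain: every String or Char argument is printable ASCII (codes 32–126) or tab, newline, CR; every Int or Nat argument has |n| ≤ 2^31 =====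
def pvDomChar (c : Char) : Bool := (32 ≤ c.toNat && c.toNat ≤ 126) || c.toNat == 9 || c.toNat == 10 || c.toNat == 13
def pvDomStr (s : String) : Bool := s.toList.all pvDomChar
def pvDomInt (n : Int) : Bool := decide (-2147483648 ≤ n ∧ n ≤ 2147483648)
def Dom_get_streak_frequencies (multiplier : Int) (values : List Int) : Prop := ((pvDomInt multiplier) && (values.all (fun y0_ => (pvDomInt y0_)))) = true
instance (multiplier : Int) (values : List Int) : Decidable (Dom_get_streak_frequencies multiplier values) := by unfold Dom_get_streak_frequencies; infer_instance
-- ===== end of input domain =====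

-- B rebuilds the streak lengths from separator indices (gaps between indices whose
-- value is not below the multiplier) and counts them with collections.Counter;
-- same O(n) cost, different decomposition.

-- ===== PORT A =====
def get_streak_frequencies (multiplier : Int) (values : List Int) : List (Int × Int) :=
  let st := (PySem.List.pyRange 0 values.length 1).foldl
      (fun (st : Int × List Int) i =>
        if PySem.List.pyGetD values i 0 < multiplier then (st.1 + 1, st.2)
        else (0, st.2 ++ [st.1]))
      (0, [])
  let d := st.2.foldl
      (fun (d : PySem.Dict Int Int) s =>
        let d := if d.contains s then d else d.insert s 0
        d.insert s (d.getD s 0 + 1))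
      PySem.Dict.empty
  d.items

-- ===== PORT B =====
def get_streak_frequencies_alt (multiplier : Int) (values : List Int) : List (Int × Int) :=
  let seps := ((PySem.List.enumerate values 0).filter (fun p => !(p.2 < multiplier))).map (·.1)
  let st := seps.foldl (fun (st : Int × List Int) p => (p, st.2 ++ [p - st.1 - 1])) (-1, [])
  (PySem.Dict.counter st.2).items

-- ===== PRECONDITION & SPEC =====
def Spec_get_streak_frequencies (multiplier : Int) (values : List Int) (out : List (Int × Int)) : Prop := out = get_streak_frequencies_alt multiplier values
instance (multiplier : Int) (values : List Int) (out : List (Int × Int)) : Decidable (Spec_get_streak_frequencies multiplier values out) := by unfold Spec_get_streak_frequencies; infer_instance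

-- ===== CLAIM (what is proved, stated in full; the proofs are below) =====
def Claim_equal_get_streak_frequencies : Prop := ∀ (multiplier : Int) (values : List Int), Dom_get_streak_frequencies multiplier values → Spec_get_streak_frequencies multiplier values (get_streak_frequencies multiplier values)

-- ===== LEMMAS AND PROOFS =====

-- Inserting over a freshly inserted key overwrites it.
theorem pv_insert_insert (d : PySem.Dict Int Int) (k : Int) (h : d.contains k = false)
    (v w : Int) : (d.insert k v).insert k w = d.insert k w := by
  have hmem : ∀ p ∈ d.items, (p.1 == k) = false := by
    intro p hp
    cases hb : p.1 == k with
    | false => rfl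
    | true =>
      exfalso
      have hc : d.contains k = true := by
        simp only [PySem.Dict.contains, List.any_eq_true]
        exact ⟨p, hp, hb⟩
      rw [h] at hc; cases hc
  have e1 : d.insert k v = PySem.Dict.mk (d.items ++ [(k, v)]) := by
    simp [PySem.Dict.insert, h]
  have e2 : d.insert k w = PySem.Dict.mk (d.items ++ [(k, w)]) := by
    simp [PySem.Dict.insert, h]
  rw [e1, e2]
  have hc2 : (PySem.Dict.mk (d.items ++ [(k, v)]) : PySem.Dict Int Int).contains k = true := by
    simp [PySem.Dict.contains]
  simp only [PySem.Dict.insert, hc2, if_pos]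
  congr 1
  simp only [List.map_append]
  have hfix : List.map (fun p => if (p.1 == k) = true then (k, w) else p) d.items = d.items := by
    conv_rhs => rw [← List.map_id d.items]
    exact List.map_congr_left (fun p hp => by simp [hmem p hp])
  simp only at hfix ⊢
  rw [hfix]
  simp

-- A's counting step is Counter's step.
theorem pv_stepA_eq_modify (d : PySem.Dict Int Int) (s : Int) :
    (let d' := if d.contains s then d else d.insert s 0;
     d'.insert s (d'.getD s 0 + 1)) = d.modify s 0 (· + 1) := by
  by_cases h : d.contains s = true
  · simp [h, PySem.Dict.modify]
  · have h' : d.contains s = false := by simpa using h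
    simp only [if_neg h]
    rw [PySem.Dict.getD_insert_self, pv_insert_insert d s h']
    simp [PySem.Dict.modify, PySem.Dict.getD_of_not_contains, h']

theorem pv_count_eq (l : List Int) :
    l.foldl (fun (d : PySem.Dict Int Int) s =>
        let d := if d.contains s then d else d.insert s 0
        d.insert s (d.getD s 0 + 1)) PySem.Dict.empty
      = PySem.Dict.counter l := by
  rw [PySem.Dict.counter_eq_foldl]
  have hf : (fun (d : PySem.Dict Int Int) s =>
        let d := if d.contains s then d else d.insert s 0
        d.insert s (d.getD s 0 + 1))
      = (fun (d : PySem.Dict Int Int) s => d.modify s 0 (· + 1)) :=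
    funext fun d => funext fun s => pv_stepA_eq_modify d s
  rw [hf]

-- The streak-size accumulation over the values equals the gap walk over the
-- separator indices, whenever the running streak size is s - prev - 1.
theorem pv_sizes_eq (m : Int) : ∀ (values : List Int) (s prev : Int) (sz : List Int),
    (values.foldl (fun (st : Int × List Int) v =>
        if v < m then (st.1 + 1, st.2) else (0, st.2 ++ [st.1])) (s - prev - 1, sz)).2
      = ((((PySem.List.enumerate values s).filter (fun p => !(p.2 < m))).map (·.1)).foldl
          (fun (st : Int × List Int) p => (p, st.2 ++ [p - st.1 - 1])) (prev, sz)).2 := by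
  intro values
  induction values with
  | nil => intro s prev sz; simp [PySem.List.enumerate_nil]
  | cons v vs ih =>
    intro s prev sz
    rw [PySem.List.enumerate_cons]
    by_cases hv : v < m
    · have hstep : s - prev - 1 + 1 = (s + 1) - prev - 1 := by ring
      simp only [List.foldl_cons, List.filter_cons, hv, decide_true,
        Bool.not_true, Bool.false_eq_true, if_false, hstep]
      exact ih (s + 1) prev sz
    · simp only [List.foldl_cons, List.filter_cons, hv, decide_false, Bool.not_false,
        if_true, List.map_cons]
      have h2 := ih (s + 1) s (sz ++ [s - prev - 1])
      rw [show (s + 1) - s - 1 = (0 : Int) from by ring] at h2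
      exact h2

-- ===== VERDICT (by name: the statement is the Claim_ definition above) =====
theorem get_streak_frequencies_spec : Claim_equal_get_streak_frequencies := by
  intro m values _
  unfold Spec_get_streak_frequencies get_streak_frequencies get_streak_frequencies_alt
  simp only
  rw [PySem.List.foldl_pyRange_zero_pyGetD' values 0 (fun (st : Int × List Int) v => if v < m then (st.1 + 1, st.2) else (0, st.2 ++ [st.1])) ((0 : Int), ([] : List Int)), pv_count_eq]
  have h := pv_sizes_eq m values 0 (-1) []
  rw [show ((0 : Int) - (-1) - 1) = 0 from by ring] at h
  rw [h]
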